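-- pv_equiv track=rewrite | github.com/npklein/metabrain | decon_optimizer/matrix_preparation/src/main.py | create_force_dict
-- ===== SOURCE A (Python) =====
-- def create_force_dict(force_steps):
--     order = ['combine_gte_files', 'combine_eqtlprobes',
--              'create_cohort_matrix', 'create_matrices',
--              'correct_cohort_effects', 'perform_deconvolution',
--              'create_tech_covs_matrix', 'create_covs_matrix',
--              'create_extra_covs_matrix']
--     step_dependencies = {'combine_gte_files': {'create_cohort_matrix', 'create_matrices', 'create_tech_covs_matrix', 'create_covs_matrix', 'create_extra_covs_matrix'},
--                          'combine_eqtlprobes': {'create_matrices'},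
--                          'create_cohort_matrix': {'correct_cohort_effects', 'create_tech_covs_matrix'},
--                          'create_matrices': {'correct_cohort_effects', 'perform_deconvolution', 'create_tech_covs_matrix', 'create_cov_matrix'},
--                          'correct_cohort_effects': {'perform_deconvolution'},
--                          'perform_deconvolution': {'create_cov_matrix'},
--                          'create_tech_covs_matrix': {},
--                          'create_covs_matrix': {},
--                          'create_extra_covs_matrix': {}}
--     force_dict = {step: False for step in order}
--
--     if force_steps is None or len(force_steps) == 0:
--         return force_dict
--
--     if force_steps == ['all']:
--         for key in force_dict.keys():
--             force_dict[key] = True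
--     else:
--         steps = set(force_steps)
--         for step in force_steps:
--             steps = steps.union(step_dependencies[step])
--             for pos_dep_step in order[order.index(step) + 1:]:
--                 if pos_dep_step in steps:
--                     steps = steps.union(step_dependencies[pos_dep_step])
--
--         for step in steps:
--             force_dict[step] = True
--
--     return force_dict
-- ===== SOURCE B (Python) =====
-- def create_force_dict(force_steps):
--     order = ['combine_gte_files', 'combine_eqtlprobes',
--              'create_cohort_matrix', 'create_matrices',
--              'correct_cohort_effects', 'perform_deconvolution',
--              'create_tech_covs_matrix', 'create_covs_matrix',
--              'create_extra_covs_matrix']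
--     step_dependencies = {'combine_gte_files': {'create_cohort_matrix', 'create_matrices', 'create_tech_covs_matrix', 'create_covs_matrix', 'create_extra_covs_matrix'},
--                          'combine_eqtlprobes': {'create_matrices'},
--                          'create_cohort_matrix': {'correct_cohort_effects', 'create_tech_covs_matrix'},
--                          'create_matrices': {'correct_cohort_effects', 'perform_deconvolution', 'create_tech_covs_matrix', 'create_cov_matrix'},
--                          'correct_cohort_effects': {'perform_deconvolution'},
--                          'perform_deconvolution': {'create_cov_matrix'},
--                          'create_tech_covs_matrix': {},
--                          'create_covs_matrix': {},
--                          'create_extra_covs_matrix': {}}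
--     force_dict = {step: False for step in order}
--
--     if force_steps is None or len(force_steps) == 0:
--         return force_dict
--
--     if force_steps == ['all']:
--         for key in order:
--             force_dict[key] = True
--         return force_dict
--
--     # Precompute the transitive closure of the dependency graph once, walking
--     # `order` backwards (every dependency of a step sits later in `order`, or is
--     # not a step at all and has no dependencies of its own).
--     closure = {}
--     for step in reversed(order):
--         reach = set()
--         for dep in step_dependencies[step]:
--             reach.add(dep)
--             reach |= closure.get(dep, set())
--         closure[step] = reach
--
--     reached = set()
--     for step in force_steps:
--         reached.add(step)
--         reached |= closure[step]
--
--     for step in reached: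
--         force_dict[step] = True
--     return force_dict
-- ===== Notes on version B (the rewrite author's own statement) =====
-- stated objective: alternative
-- what changed: A expands dependencies by re-scanning the tail of the order list for every requested step; B instead builds the transitive-closure table of the dependency graph once with a single backward pass over order and then does one closure-union per requested step.
import Mathlib
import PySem

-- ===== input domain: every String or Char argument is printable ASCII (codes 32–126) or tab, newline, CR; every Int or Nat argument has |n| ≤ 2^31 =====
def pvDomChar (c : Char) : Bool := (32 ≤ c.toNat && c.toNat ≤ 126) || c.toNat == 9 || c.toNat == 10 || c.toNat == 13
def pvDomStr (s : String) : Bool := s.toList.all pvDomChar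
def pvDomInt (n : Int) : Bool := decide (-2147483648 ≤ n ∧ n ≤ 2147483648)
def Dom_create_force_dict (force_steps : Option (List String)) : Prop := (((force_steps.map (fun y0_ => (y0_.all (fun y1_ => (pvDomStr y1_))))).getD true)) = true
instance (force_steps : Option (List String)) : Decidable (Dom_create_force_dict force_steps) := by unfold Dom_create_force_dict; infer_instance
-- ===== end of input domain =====

-- B replaces A's per-requested-step forward scans of `order` by a transitive-closure
-- table built once by a single backward pass over `order` (alternative decomposition;
-- return values are identical on all inputs where A returns).
-- Note: both Pythons iterate over a set when writing True into force_dict; the resulting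
-- dict does not depend on that iteration order (the only key not already present is
-- 'create_cov_matrix'), so the ports fold over the Set's stored list.

-- ===== PORT A =====
-- shared literal data (identical lines in both Python sources)
def pvOrder : List String :=
  ["combine_gte_files", "combine_eqtlprobes",
   "create_cohort_matrix", "create_matrices",
   "correct_cohort_effects", "perform_deconvolution",
   "create_tech_covs_matrix", "create_covs_matrix",
   "create_extra_covs_matrix"]

def pvDeps : PySem.Dict String (PySem.Set String) := PySem.Dict.ofList
  [("combine_gte_files", PySem.Set.ofList ["create_cohort_matrix", "create_matrices", "create_tech_covs_matrix", "create_covs_matrix", "create_extra_covs_matrix"]),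
   ("combine_eqtlprobes", PySem.Set.ofList ["create_matrices"]),
   ("create_cohort_matrix", PySem.Set.ofList ["correct_cohort_effects", "create_tech_covs_matrix"]),
   ("create_matrices", PySem.Set.ofList ["correct_cohort_effects", "perform_deconvolution", "create_tech_covs_matrix", "create_cov_matrix"]),
   ("correct_cohort_effects", PySem.Set.ofList ["perform_deconvolution"]),
   ("perform_deconvolution", PySem.Set.ofList ["create_cov_matrix"]),
   ("create_tech_covs_matrix", PySem.Set.ofList []),
   ("create_covs_matrix", PySem.Set.ofList []),
   ("create_extra_covs_matrix", PySem.Set.ofList [])]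

-- inner loop of A: 'for pos_dep_step in order[order.index(step)+1:]: if pos_dep_step in steps: steps |= deps[...]'
def pvStep (S : PySem.Set String) (a : String) : PySem.Set String :=
  if S.contains a then
    match pvDeps.get? a with
    | some d => S.union d
    | none => S          -- unreachable: every element of a slice of order is a deps key
  else S

def pvScanA (S : PySem.Set String) (L : List String) : PySem.Set String := L.foldl pvStep S

-- body of A's outer 'for step in force_steps' loop
def pvStep0 (S : PySem.Set String) (step : String) : PySem.Set String :=
  match pvDeps.get? step with
  | none => S            -- Python raises KeyError here; excluded by Pre_
  | some d =>
    match PySem.List.index? pvOrder step with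
    | none => S.union d  -- unreachable: every deps key is in order
    | some i => pvScanA (S.union d) (PySem.List.slice pvOrder (some ((i : Int) + 1)) none)

def pvStepsA (fs : List String) : PySem.Set String := fs.foldl pvStep0 (PySem.Set.ofList fs)

def create_force_dict (force_steps : Option (List String)) : List (String × Bool) :=
  let force_dict : PySem.Dict String Bool :=
    pvOrder.foldl (fun d s => d.insert s false) PySem.Dict.empty
  match force_steps with
  | none => force_dict.items
  | some fs =>
    if fs.length = 0 then force_dict.items
    else if fs = ["all"] then
      (force_dict.keys.foldl (fun d k => d.insert k true) force_dict).items
    else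
      ((pvStepsA fs).foldl (fun d s => d.insert s true) force_dict).items

-- ===== PORT B =====
-- transitive-closure table: one backward pass over order
def pvClosureB : PySem.Dict String (PySem.Set String) :=
  pvOrder.reverse.foldl (fun cl step =>
    match pvDeps.get? step with
    | none => cl         -- unreachable: every element of order is a deps key
    | some dset =>
      let reach := dset.foldl
        (fun (r : PySem.Set String) dep =>
          PySem.Set.union (PySem.Set.add r dep) (cl.getD dep PySem.Set.empty)) PySem.Set.empty
      cl.insert step reach) PySem.Dict.empty

-- body of B's 'for step in force_steps' loop
def pvBStep (r : PySem.Set String) (step : String) : PySem.Set String :=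
  let r2 := PySem.Set.add r step
  match pvClosureB.get? step with
  | none => r2           -- Python raises KeyError here; excluded by Pre_
  | some c => r2.union c

def pvReachedB (fs : List String) : PySem.Set String := fs.foldl pvBStep PySem.Set.empty

def create_force_dict_alt (force_steps : Option (List String)) : List (String × Bool) :=
  let force_dict : PySem.Dict String Bool :=
    pvOrder.foldl (fun d s => d.insert s false) PySem.Dict.empty
  match force_steps with
  | none => force_dict.items
  | some fs =>
    if fs.length = 0 then force_dict.items
    else if fs = ["all"] then
      (pvOrder.foldl (fun d k => d.insert k true) force_dict).items
    else
      ((pvReachedB fs).foldl (fun d s => d.insert s true) force_dict).items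

-- ===== PRECONDITION & SPEC =====
-- Pre_ excludes exactly the inputs on which A raises KeyError: a list that reaches the
-- dependency lookup (non-empty, not the special all-request) while containing a string
-- that is not a step_dependencies key (= not an element of order).
def Pre_create_force_dict (force_steps : Option (List String)) : Prop :=
  force_steps.getD [] = ["all"] ∨ ∀ s ∈ force_steps.getD [], s ∈ pvOrder
instance (force_steps : Option (List String)) : Decidable (Pre_create_force_dict force_steps) := by
  unfold Pre_create_force_dict; infer_instance

def pvWitness_create_force_dict : Option (List String) := some ["combine_gte_files", "perform_deconvolution"]

def Spec_create_force_dict (force_steps : Option (List String)) (out : List (String × Bool)) : Prop := out = create_force_dict_alt force_steps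
instance (force_steps : Option (List String)) (out : List (String × Bool)) : Decidable (Spec_create_force_dict force_steps out) := by unfold Spec_create_force_dict; infer_instance

-- ===== CLAIM (what is proved, stated in full; the proofs are below) =====
def Claim_equal_create_force_dict : Prop := ∀ (force_steps : Option (List String)), Dom_create_force_dict force_steps → Pre_create_force_dict force_steps → Spec_create_force_dict force_steps (create_force_dict force_steps)

-- ===== LEMMAS AND PROOFS =====

-- the typo'd pseudo-step that the data mentions but order does not contain
def pvCC : String := "create_cov_matrix"

-- dependency lists / order-suffixes / reachability sets, as literal tables (proof-only)
def pvDepsL : String → List String := fun s =>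
  if s = "combine_gte_files" then ["create_cohort_matrix", "create_matrices", "create_tech_covs_matrix", "create_covs_matrix", "create_extra_covs_matrix"]
  else if s = "combine_eqtlprobes" then ["create_matrices"]
  else if s = "create_cohort_matrix" then ["correct_cohort_effects", "create_tech_covs_matrix"]
  else if s = "create_matrices" then ["correct_cohort_effects", "perform_deconvolution", "create_tech_covs_matrix", "create_cov_matrix"]
  else if s = "correct_cohort_effects" then ["perform_deconvolution"]
  else if s = "perform_deconvolution" then ["create_cov_matrix"]
  else []

def pvReach : String → List String := fun s =>
  if s = "combine_gte_files" then ["create_cohort_matrix", "correct_cohort_effects", "perform_deconvolution", "create_cov_matrix", "create_tech_covs_matrix", "create_matrices", "create_covs_matrix", "create_extra_covs_matrix"]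
  else if s = "combine_eqtlprobes" then ["create_matrices", "correct_cohort_effects", "perform_deconvolution", "create_cov_matrix", "create_tech_covs_matrix"]
  else if s = "create_cohort_matrix" then ["correct_cohort_effects", "perform_deconvolution", "create_cov_matrix", "create_tech_covs_matrix"]
  else if s = "create_matrices" then ["correct_cohort_effects", "perform_deconvolution", "create_cov_matrix", "create_tech_covs_matrix"]
  else if s = "correct_cohort_effects" then ["perform_deconvolution", "create_cov_matrix"]
  else if s = "perform_deconvolution" then ["create_cov_matrix"]
  else []

-- target: final forced set = requested steps plus everything reachable from them
def pvOK (fs : List String) (x : String) : Prop := x ∈ fs ∨ ∃ s ∈ fs, x ∈ pvReach s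

theorem pv_deps_get : ∀ s ∈ pvOrder, pvDeps.get? s = some (PySem.Set.ofList (pvDepsL s)) := by
  decide

theorem pv_closure_get : ∀ s ∈ pvOrder, pvClosureB.get? s = some (pvReach s) := by
  decide

-- small closed facts about the tables
theorem pv_depsL_sub_reach : ∀ s ∈ pvOrder, ∀ d ∈ pvDepsL s, d ∈ pvReach s := by decide
theorem pv_reach_closed : ∀ s ∈ pvOrder, ∀ a ∈ pvReach s, ∀ d ∈ pvDepsL a, d ∈ pvReach s := by decide
theorem pv_reach_range : ∀ s ∈ pvOrder, ∀ a ∈ pvReach s, a ∈ pvOrder ∨ a = pvCC := by decide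
theorem pv_cc_not_order : pvCC ∉ pvOrder := by decide

-- generic fold-extensivity
theorem pv_foldl_ext {f : PySem.Set String → String → PySem.Set String} {x : String}
    (hf : ∀ S a, x ∈ S → x ∈ f S a) :
    ∀ (l : List String) (S : PySem.Set String), x ∈ S → x ∈ l.foldl f S := by
  intro l
  induction l with
  | nil => intro S h; exact h
  | cons a l ih => intro S h; exact ih _ (hf _ _ h)

theorem pv_mem_pvStep {x : String} (S : PySem.Set String) (a : String) (h : x ∈ S) : x ∈ pvStep S a := by
  unfold pvStep
  split
  · cases pvDeps.get? a with
    | none => exact h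
    | some d => exact (PySem.Set.mem_union _ _ _).2 (Or.inl h)
  · exact h

theorem pv_mem_pvStep0 {x : String} (S : PySem.Set String) (a : String) (h : x ∈ S) : x ∈ pvStep0 S a := by
  unfold pvStep0
  cases hg : pvDeps.get? a with
  | none => exact h
  | some d =>
    cases hi : PySem.List.index? pvOrder a with
    | none => exact (PySem.Set.mem_union _ _ _).2 (Or.inl h)
    | some i =>
      exact pv_foldl_ext (fun S a => pv_mem_pvStep S a) _ _ ((PySem.Set.mem_union _ _ _).2 (Or.inl h))

theorem pv_scan_ext {x : String} (L : List String) (S : PySem.Set String) (h : x ∈ S) : x ∈ pvScanA S L :=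
  pv_foldl_ext (fun S a => pv_mem_pvStep S a) L S h

theorem pv_fire (S : PySem.Set String) (a : String) (d : PySem.Set String)
    (ha : a ∈ S) (hd : pvDeps.get? a = some d) : pvStep S a = S.union d := by
  unfold pvStep
  rw [if_pos ((PySem.Set.contains_iff _ _).2 ha), hd]

-- evaluation of A's outer-loop body on each of the nine steps
def pvSuffix : String → List String := fun s =>
  if s = "combine_gte_files" then pvOrder.drop 1
  else if s = "combine_eqtlprobes" then pvOrder.drop 2
  else if s = "create_cohort_matrix" then pvOrder.drop 3
  else if s = "create_matrices" then pvOrder.drop 4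
  else if s = "correct_cohort_effects" then pvOrder.drop 5
  else if s = "perform_deconvolution" then pvOrder.drop 6
  else if s = "create_tech_covs_matrix" then pvOrder.drop 7
  else if s = "create_covs_matrix" then pvOrder.drop 8
  else if s = "create_extra_covs_matrix" then pvOrder.drop 9
  else []

theorem pv_step0_eval : ∀ s ∈ pvOrder, ∀ S,
    pvStep0 S s = pvScanA (S.union (PySem.Set.ofList (pvDepsL s))) (pvSuffix s) := by
  intro s hs S
  fin_cases hs <;> rfl

theorem pv_suffix_sub : ∀ s ∈ pvOrder, ∀ a ∈ pvSuffix s, a ∈ pvOrder := by decide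

-- upper bound: the scan only ever adds dependencies of things already forced
theorem pv_ok_closed (fs : List String) (hfs : ∀ s ∈ fs, s ∈ pvOrder)
    {a : String} (ha : pvOK fs a) {d : String} (hd : d ∈ pvDepsL a) : pvOK fs d := by
  rcases ha with ha | ⟨s, hs, ha⟩
  · exact Or.inr ⟨a, ha, pv_depsL_sub_reach a (hfs a ha) d hd⟩
  · exact Or.inr ⟨s, hs, pv_reach_closed s (hfs s hs) a ha d hd⟩

theorem pv_scan_upper (fs : List String) (hfs : ∀ s ∈ fs, s ∈ pvOrder) :
    ∀ (L : List String), (∀ a ∈ L, a ∈ pvOrder) →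
    ∀ (S : PySem.Set String), (∀ y ∈ S, pvOK fs y) →
    ∀ x ∈ pvScanA S L, pvOK fs x := by
  intro L
  induction L with
  | nil => intro _ S hS x hx; exact hS x hx
  | cons a L ih =>
    intro hL S hS x hx
    have hx' : x ∈ pvScanA (pvStep S a) L := hx
    refine ih (fun b hb => hL b (List.mem_cons_of_mem _ hb)) (pvStep S a) ?_ x hx'
    intro y hy
    have ha : a ∈ pvOrder := hL a List.mem_cons_self
    unfold pvStep at hy
    by_cases hc : S.contains a
    · rw [if_pos hc, pv_deps_get a ha] at hy
      rcases (PySem.Set.mem_union _ _ _).1 hy with h | h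
      · exact hS y h
      · have haS : a ∈ S := (PySem.Set.contains_iff _ _).1 hc
        exact pv_ok_closed fs hfs (hS a haS) ((PySem.Set.mem_ofList _ _).1 h)
    · rw [if_neg hc] at hy; exact hS y hy

theorem pv_stepsA_upper (fs : List String) (hfs : ∀ s ∈ fs, s ∈ pvOrder) :
    ∀ x ∈ pvStepsA fs, pvOK fs x := by
  have main : ∀ (l : List String), (∀ s ∈ l, s ∈ fs) →
      ∀ (S : PySem.Set String), (∀ y ∈ S, pvOK fs y) → ∀ x ∈ l.foldl pvStep0 S, pvOK fs x := by
    intro l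
    induction l with
    | nil => intro _ S hS x hx; exact hS x hx
    | cons a l ih =>
      intro hl S hS x hx
      have hafs : a ∈ fs := hl a List.mem_cons_self
      have haord : a ∈ pvOrder := hfs a hafs
      refine ih (fun b hb => hl b (List.mem_cons_of_mem _ hb)) (pvStep0 S a) ?_ x hx
      intro y hy
      rw [pv_step0_eval a haord S] at hy
      refine pv_scan_upper fs hfs (pvSuffix a) (pv_suffix_sub a haord) _ ?_ y hy
      intro z hz
      rcases (PySem.Set.mem_union _ _ _).1 hz with h | h
      · exact hS z h
      · exact Or.inr ⟨a, hafs, pv_depsL_sub_reach a haord z ((PySem.Set.mem_ofList _ _).1 h)⟩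
  intro x hx
  refine main fs (fun s hs => hs) (PySem.Set.ofList fs) ?_ x hx
  intro y hy
  exact Or.inl ((PySem.Set.mem_ofList _ _).1 hy)

-- lower bound: everything reachable from a requested step ends up in the set
theorem pv_scan_fire {x : String} {d : PySem.Set String} (S : PySem.Set String)
    (m : String) (L1 L2 : List String) (hm : m ∈ pvScanA S L1)
    (hd : pvDeps.get? m = some d) (hx : x ∈ d ∨ x ∈ pvScanA S L1) :
    x ∈ pvScanA S (L1 ++ m :: L2) := by
  unfold pvScanA at *
  rw [List.foldl_append]
  show x ∈ List.foldl pvStep (pvStep (List.foldl pvStep S L1) m) L2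
  rw [pv_fire _ _ _ hm hd]
  exact pv_foldl_ext (fun S a => pv_mem_pvStep S a) _ _
    ((PySem.Set.mem_union _ _ _).2 (hx.elim Or.inr Or.inl))

set_option maxHeartbeats 1600000 in
theorem pv_reach_sub_step0 : ∀ s ∈ pvOrder, ∀ (S : PySem.Set String), ∀ x ∈ pvReach s, x ∈ pvStep0 S s := by
  intro s hs S x hx
  rw [pv_step0_eval s hs S]
  fin_cases hs
  · -- combine_gte_files: its own deps are seeded; 'create_matrices' fires two entries into the suffix
    fin_cases hx <;>
      first
      | exact pv_scan_ext _ _ ((PySem.Set.mem_union _ _ _).2 (Or.inr (by decide)))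
      | (refine pv_scan_fire _ "create_matrices" ["combine_eqtlprobes", "create_cohort_matrix"] _ ?_
          (pv_deps_get _ (by decide)) (Or.inl (by decide))
         exact pv_scan_ext _ _ ((PySem.Set.mem_union _ _ _).2 (Or.inr (by decide))))
  · -- combine_eqtlprobes: 'create_matrices' fires one entry into the suffix
    fin_cases hx <;>
      first
      | exact pv_scan_ext _ _ ((PySem.Set.mem_union _ _ _).2 (Or.inr (by decide)))
      | (refine pv_scan_fire _ "create_matrices" ["create_cohort_matrix"] _ ?_
          (pv_deps_get _ (by decide)) (Or.inl (by decide))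
         exact pv_scan_ext _ _ ((PySem.Set.mem_union _ _ _).2 (Or.inr (by decide))))
  · -- create_cohort_matrix: 'correct_cohort_effects' fires, which lights 'perform_deconvolution'
    fin_cases hx <;>
      first
      | exact pv_scan_ext _ _ ((PySem.Set.mem_union _ _ _).2 (Or.inr (by decide)))
      | (refine pv_scan_fire _ "correct_cohort_effects" ["create_matrices"] _ ?_
          (pv_deps_get _ (by decide)) (Or.inl (by decide))
         exact pv_scan_ext _ _ ((PySem.Set.mem_union _ _ _).2 (Or.inr (by decide))))
      | (refine pv_scan_fire _ "perform_deconvolution" ["create_matrices", "correct_cohort_effects"] _ ?_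
          (pv_deps_get _ (by decide)) (Or.inl (by decide))
         refine pv_scan_fire _ "correct_cohort_effects" ["create_matrices"] _ ?_
          (pv_deps_get _ (by decide)) (Or.inl (by decide))
         exact pv_scan_ext _ _ ((PySem.Set.mem_union _ _ _).2 (Or.inr (by decide))))
  · -- create_matrices: every reachable step is a direct dependency
    fin_cases hx <;>
      exact pv_scan_ext _ _ ((PySem.Set.mem_union _ _ _).2 (Or.inr (by decide)))
  · -- correct_cohort_effects: 'perform_deconvolution' fires at the head of the suffix
    fin_cases hx <;>
      first
      | exact pv_scan_ext _ _ ((PySem.Set.mem_union _ _ _).2 (Or.inr (by decide)))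
      | (refine pv_scan_fire _ "perform_deconvolution" [] _ ?_
          (pv_deps_get _ (by decide)) (Or.inl (by decide))
         exact pv_scan_ext _ _ ((PySem.Set.mem_union _ _ _).2 (Or.inr (by decide))))
  · -- perform_deconvolution: the only reachable node is its direct dependency
    fin_cases hx
    exact pv_scan_ext _ _ ((PySem.Set.mem_union _ _ _).2 (Or.inr (by decide)))
  · fin_cases hx
  · fin_cases hx
  · fin_cases hx

theorem pv_stepsA_lower (fs : List String) (hfs : ∀ s ∈ fs, s ∈ pvOrder) :
    ∀ x, pvOK fs x → x ∈ pvStepsA fs := by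
  have hfold : ∀ (l : List String) (S : PySem.Set String) (s : String), s ∈ l → s ∈ pvOrder →
      ∀ x ∈ pvReach s, x ∈ l.foldl pvStep0 S := by
    intro l
    induction l with
    | nil => intro S s h; cases h
    | cons a l ih =>
      intro S s hmem hord x hx
      rcases List.mem_cons.1 hmem with rfl | h
      · exact pv_foldl_ext (fun S a => pv_mem_pvStep0 S a) l _ (pv_reach_sub_step0 s hord S x hx)
      · exact ih _ s h hord x hx
  intro x hok
  rcases hok with hx | ⟨s, hsfs, hx⟩
  · exact pv_foldl_ext (fun S a => pv_mem_pvStep0 S a) fs _ ((PySem.Set.mem_ofList _ _).2 hx)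
  · exact hfold fs _ s hsfs (hfs s hsfs) x hx

theorem pv_stepsA_char (fs : List String) (hfs : ∀ s ∈ fs, s ∈ pvOrder) (x : String) :
    x ∈ pvStepsA fs ↔ pvOK fs x :=
  ⟨fun h => pv_stepsA_upper fs hfs x h, fun h => pv_stepsA_lower fs hfs x h⟩

-- B's reached set is the same set
theorem pv_reachedB_char (fs : List String) (hfs : ∀ s ∈ fs, s ∈ pvOrder) (x : String) :
    x ∈ pvReachedB fs ↔ pvOK fs x := by
  have heval : ∀ a ∈ pvOrder, ∀ r : PySem.Set String, pvBStep r a = (r.add a).union (pvReach a) := by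
    intro a ha r
    unfold pvBStep
    rw [pv_closure_get a ha]
  have gen : ∀ (l : List String), (∀ s ∈ l, s ∈ pvOrder) → ∀ (r : PySem.Set String) (x : String),
      (x ∈ l.foldl pvBStep r ↔ x ∈ r ∨ x ∈ l ∨ ∃ s ∈ l, x ∈ pvReach s) := by
    intro l
    induction l with
    | nil => intro _ r x; simp
    | cons a l ih =>
      intro h r x
      rw [List.foldl_cons, heval a (h a List.mem_cons_self),
          ih (fun s hs => h s (List.mem_cons_of_mem _ hs)) _ x,
          PySem.Set.mem_union, PySem.Set.mem_add]
      simp only [List.mem_cons]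
      constructor
      · rintro (((h1 | h1) | h1) | h1 | ⟨s, hs, h1⟩)
        · exact Or.inl h1
        · exact Or.inr (Or.inl (Or.inl h1))
        · exact Or.inr (Or.inr ⟨a, Or.inl rfl, h1⟩)
        · exact Or.inr (Or.inl (Or.inr h1))
        · exact Or.inr (Or.inr ⟨s, Or.inr hs, h1⟩)
      · rintro (h1 | (h1 | h1) | ⟨s, (rfl | hs), h1⟩)
        · exact Or.inl (Or.inl (Or.inl h1))
        · exact Or.inl (Or.inl (Or.inr h1))
        · exact Or.inr (Or.inl h1)
        · exact Or.inl (Or.inr h1)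
        · exact Or.inr (Or.inr ⟨s, hs, h1⟩)
  unfold pvReachedB pvOK
  rw [gen fs hfs PySem.Set.empty x]
  simp [PySem.Set.empty]

-- the dict bookkeeping
def pvMk (f : String → Bool) (c : Bool) : List (String × Bool) :=
  pvOrder.map (fun o => (o, f o)) ++ (if c then [(pvCC, true)] else [])

theorem pv_mk_congr {f g : String → Bool} {c c' : Bool}
    (h : ∀ o ∈ pvOrder, f o = g o) (hc : c = c') : pvMk f c = pvMk g c' := by
  unfold pvMk
  rw [hc, List.map_congr_left (fun o ho => by rw [h o ho])]

theorem pv_keys_mk (f : String → Bool) (c : Bool) :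
    (PySem.Dict.mk (pvMk f c)).keys = pvOrder ++ (if c then [pvCC] else []) := by
  show (pvMk f c).map (·.1) = _
  unfold pvMk
  rw [List.map_append, List.map_map]
  rw [show List.map ((fun p => p.1) ∘ fun o => (o, f o)) pvOrder = pvOrder by
        simp only [Function.comp_def]; exact List.map_id' pvOrder]
  congr 1
  cases c <;> simp

theorem pv_insert_order (f : String → Bool) (c : Bool) (s : String) (hs : s ∈ pvOrder) :
    (PySem.Dict.mk (pvMk f c)).insert s true
      = PySem.Dict.mk (pvMk (fun o => if o = s then true else f o) c) := by
  have hne : pvCC ≠ s := fun h => pv_cc_not_order (h ▸ hs)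
  have hcont : (PySem.Dict.mk (pvMk f c)).contains s = true := by
    rw [PySem.Dict.contains_eq_decide_mem_keys, pv_keys_mk]
    simp [hs]
  apply PySem.Dict.ext
  rw [PySem.Dict.items_insert_of_contains _ _ hcont]
  show (pvMk f c).map _ = pvMk _ c
  unfold pvMk
  rw [List.map_append]
  congr 1
  · rw [List.map_map]
    refine List.map_congr_left ?_
    intro o _
    by_cases h : o = s
    · subst h; simp
    · simp [Function.comp, h]
  · cases c <;> simp [hne]

theorem pv_insert_cc (f : String → Bool) (c : Bool) :
    (PySem.Dict.mk (pvMk f c)).insert pvCC true = PySem.Dict.mk (pvMk f true) := by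
  have hccord : ∀ o ∈ pvOrder, o ≠ pvCC := fun o ho h => pv_cc_not_order (h ▸ ho)
  cases c with
  | false =>
    have hcont : (PySem.Dict.mk (pvMk f false)).contains pvCC = false := by
      rw [PySem.Dict.contains_eq_decide_mem_keys, pv_keys_mk]
      simp [pv_cc_not_order]
    apply PySem.Dict.ext
    rw [PySem.Dict.items_insert_of_not_contains _ _ hcont]
    show pvMk f false ++ _ = pvMk f true
    unfold pvMk
    simp
  | true =>
    have hcont : (PySem.Dict.mk (pvMk f true)).contains pvCC = true := by
      rw [PySem.Dict.contains_eq_decide_mem_keys, pv_keys_mk]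
      simp
    apply PySem.Dict.ext
    rw [PySem.Dict.items_insert_of_contains _ _ hcont]
    show (pvMk f true).map _ = pvMk f true
    have hfix : ∀ p ∈ pvMk f true,
        (if (p.1 == pvCC) = true then (pvCC, true) else p) = id p := by
      intro p hp
      unfold pvMk at hp
      rcases List.mem_append.1 hp with hp | hp
      · obtain ⟨o, ho, rfl⟩ := List.mem_map.1 hp
        simpa using fun h => absurd h (hccord o ho)
      · simp only [if_true, List.mem_singleton] at hp
        subst hp
        simp
    rw [List.map_congr_left hfix, List.map_id]

theorem pv_fold_insert_true (l : List String) (h : ∀ s ∈ l, s ∈ pvOrder ∨ s = pvCC) :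
    ∀ (f : String → Bool) (c : Bool),
    l.foldl (fun d s => d.insert s true) (PySem.Dict.mk (pvMk f c))
      = PySem.Dict.mk (pvMk (fun o => f o || decide (o ∈ l)) (c || decide (pvCC ∈ l))) := by
  induction l with
  | nil =>
    intro f c
    exact congrArg _ (pv_mk_congr (fun o _ => by simp) (by simp))
  | cons s l ih =>
    intro f c
    rcases h s List.mem_cons_self with hs | rfl
    · rw [List.foldl_cons, pv_insert_order f c s hs,
          ih (fun t ht => h t (List.mem_cons_of_mem _ ht))]
      refine congrArg _ (pv_mk_congr ?_ ?_)
      · intro o _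
        by_cases ho : o = s
        · subst ho; simp
        · simp [ho, List.mem_cons]
      · have hne : pvCC ≠ s := fun hcc => pv_cc_not_order (hcc ▸ hs)
        simp [List.mem_cons, hne]
    · rw [List.foldl_cons, pv_insert_cc f c,
          ih (fun t ht => h t (List.mem_cons_of_mem _ ht))]
      refine congrArg _ (pv_mk_congr ?_ ?_)
      · intro o ho
        have hne : o ≠ pvCC := fun hcc => pv_cc_not_order (hcc ▸ ho)
        simp [List.mem_cons, hne]
      · simp

theorem pv_d0_eq :
    pvOrder.foldl (fun d s => d.insert s false) (PySem.Dict.empty : PySem.Dict String Bool)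
      = PySem.Dict.mk (pvMk (fun _ => false) false) := by
  decide

theorem pv_range_of_ok (l : List String) (hord : ∀ s ∈ l, s ∈ pvOrder) :
    ∀ s, pvOK l s → s ∈ pvOrder ∨ s = pvCC := by
  intro s hs
  rcases hs with h | ⟨t, ht, h⟩
  · exact Or.inl (hord s h)
  · exact pv_reach_range t (hord t ht) s h

-- ===== VERDICT =====
theorem create_force_dict_spec : Claim_equal_create_force_dict := by
  intro fs _ hpre
  unfold Spec_create_force_dict
  cases fs with
  | none => rfl
  | some l =>
    by_cases h0 : l.length = 0
    · simp [create_force_dict, create_force_dict_alt, h0]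
    · by_cases hall : l = ["all"]
      · subst hall; decide
      · have hord : ∀ s ∈ l, s ∈ pvOrder := by
          unfold Pre_create_force_dict at hpre
          simpa [hall] using hpre
        have hsubA : ∀ s ∈ pvStepsA l, s ∈ pvOrder ∨ s = pvCC :=
          fun s hs => pv_range_of_ok l hord s (pv_stepsA_upper l hord s hs)
        have hsubB : ∀ s ∈ pvReachedB l, s ∈ pvOrder ∨ s = pvCC :=
          fun s hs => pv_range_of_ok l hord s ((pv_reachedB_char l hord s).1 hs)
        have eA : create_force_dict (some l) = ((pvStepsA l).foldl (fun d s => d.insert s true)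
            (pvOrder.foldl (fun d s => d.insert s false) PySem.Dict.empty)).items := by
          simp [create_force_dict, h0, hall]
        have eB : create_force_dict_alt (some l) = ((pvReachedB l).foldl (fun d s => d.insert s true)
            (pvOrder.foldl (fun d s => d.insert s false) PySem.Dict.empty)).items := by
          simp [create_force_dict_alt, h0, hall]
        rw [eA, eB, pv_d0_eq, pv_fold_insert_true _ hsubA, pv_fold_insert_true _ hsubB]
        show pvMk _ _ = pvMk _ _
        have hch : ∀ o, (o ∈ pvStepsA l ↔ o ∈ pvReachedB l) :=
          fun o => (pv_stepsA_char l hord o).trans (pv_reachedB_char l hord o).symm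
        refine pv_mk_congr ?_ ?_
        · intro o _
          simp only [Bool.false_or]
          exact decide_eq_decide.mpr (hch o)
        · simp only [Bool.false_or]
          exact decide_eq_decide.mpr (hch pvCC)
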